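-- pv_equiv track=rewrite | github.com/ivanthepevt/EIS_data_collator | EIS_data_collater/colattor.py | getnewdir
-- ===== SOURCE A (Python) =====
-- def getnewdir(olddir):
--     splitdir = olddir.split("/")
--     oldfilename = splitdir[-1]
--     newfilename = ""
--     splitdir.pop()
--     for text in splitdir:
--         newfilename = newfilename + text + "/"
--     newfilename = newfilename + "colatted_" + oldfilename
--     return newfilename
-- ===== SOURCE B (Python) =====
-- def getnewdir(olddir):
--     i = olddir.rfind('/')
--     return olddir[:i+1] + 'colatted_' + olddir[i+1:]
-- ===== Notes on version B (the rewrite author's own statement) =====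
-- stated objective: simpler
-- what changed: B drops A's split-all-components-and-rebuild loop entirely: it finds the last '/' with a single rfind and returns two slices around it joined by 'colatted_'.
import Mathlib
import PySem

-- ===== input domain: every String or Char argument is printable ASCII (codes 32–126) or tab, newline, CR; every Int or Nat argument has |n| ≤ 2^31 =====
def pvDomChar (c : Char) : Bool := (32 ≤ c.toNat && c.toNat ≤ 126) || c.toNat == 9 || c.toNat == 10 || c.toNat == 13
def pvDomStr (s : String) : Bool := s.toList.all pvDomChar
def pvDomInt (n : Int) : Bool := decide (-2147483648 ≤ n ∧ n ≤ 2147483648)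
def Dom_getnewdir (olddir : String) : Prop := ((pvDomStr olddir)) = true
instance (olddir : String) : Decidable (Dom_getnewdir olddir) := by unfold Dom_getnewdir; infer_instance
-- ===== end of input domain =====

-- B replaces A's split-everything-and-rebuild loop by a single rfind of the last '/' plus two slices (simpler; no loop).

-- ===== PORT A =====
def getnewdir (olddir : String) : String :=
  let splitdir := PySem.Chars.splitOn olddir.toList ['/']
  let oldfilename := (PySem.List.pyGet? splitdir (-1)).getD []   -- splitdir[-1]; split never returns [], so no IndexError
  let splitdir := splitdir.dropLast                              -- splitdir.pop(): removes the last element (list nonempty)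
  let newfilename := splitdir.foldl (fun acc text => acc ++ text ++ ['/']) []
  String.ofList (newfilename ++ "colatted_".toList ++ oldfilename)

-- ===== PORT B =====
def getnewdir_alt (olddir : String) : String :=
  let i := PySem.Chars.rfind olddir.toList ['/']                 -- olddir.rfind('/')
  String.ofList (PySem.Chars.slice olddir.toList none (some (i + 1)) ++   -- olddir[:i+1]
             "colatted_".toList ++
             PySem.Chars.slice olddir.toList (some (i + 1)) none)     -- olddir[i+1:]

-- ===== PRECONDITION & SPEC =====
def Spec_getnewdir (olddir : String) (out : String) : Prop := out = getnewdir_alt olddir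
instance (olddir : String) (out : String) : Decidable (Spec_getnewdir olddir out) := by unfold Spec_getnewdir; infer_instance

-- ===== CLAIM (what is proved, stated in full; the proofs are below) =====
def Claim_equal_getnewdir : Prop := ∀ (olddir : String), Dom_getnewdir olddir → Spec_getnewdir olddir (getnewdir olddir)

-- ===== LEMMAS AND PROOFS =====

-- the result both programs compute: copy characters up to and including the last '/', then "colatted_", then the rest
def pvAnat : List Char → List Char
  | [] => "colatted_".toList
  | c :: r => if c = '/' ∨ '/' ∈ r then c :: pvAnat r else "colatted_".toList ++ c :: r

theorem pvAnat_no_slash (s : List Char) (h : '/' ∉ s) : pvAnat s = "colatted_".toList ++ s := by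
  cases s with
  | nil => rfl
  | cons c r =>
    simp only [List.mem_cons, not_or] at h
    simp [pvAnat, Ne.symm h.1, h.2]

-- ---- A side: a fuel-free description of PySem.Chars.splitOn on the single-character separator '/'
def pvAux : List Char → List Char → List (List Char)
  | [], cur => [cur.reverse]
  | c :: r, cur => if c = '/' then cur.reverse :: pvAux r [] else pvAux r (c :: cur)

theorem pv_go_eq_aux : ∀ (fuel : ℕ) (l cur : List Char) (acc : List (List Char)),
    l.length < fuel →
    PySem.Chars.splitOn.go ['/'] fuel l cur acc = acc.reverse ++ pvAux l cur := by
  intro fuel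
  induction fuel with
  | zero => intro l cur acc h; omega
  | succ f ih =>
    intro l cur acc h
    cases l with
    | nil =>
      rw [PySem.Chars.splitOn.go]
      simp only [pvAux, List.reverse_cons]
      omega
    | cons c rest =>
      rw [PySem.Chars.splitOn.go]
      simp only [List.length_cons] at h
      by_cases hc : c = '/'
      · have hpre : ['/'].isPrefixOf (c :: rest) = true := by simp [List.isPrefixOf, hc]
        rw [if_pos hpre]
        simp only [List.length_singleton, List.drop_succ_cons, List.drop_zero]
        rw [ih rest [] (cur.reverse :: acc) (by omega)]
        simp [pvAux, hc]
      · have hc' : ¬ ('/' = c) := fun h => hc h.symm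
        have hpre : ['/'].isPrefixOf (c :: rest) = false := by
          simp [List.isPrefixOf, hc']
        rw [if_neg (by simp [hpre])]
        rw [ih rest (c :: cur) acc (by omega)]
        simp [pvAux, hc]

theorem pv_splitOn_eq_aux (s : List Char) : PySem.Chars.splitOn s ['/'] = pvAux s [] := by
  show PySem.Chars.splitOn.go ['/'] (s.length + 1) s [] [] = pvAux s []
  rw [pv_go_eq_aux (s.length + 1) s [] [] (by omega)]
  rfl

theorem pvAux_ne_nil (s cur : List Char) : pvAux s cur ≠ [] := by
  induction s generalizing cur with
  | nil => simp [pvAux]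
  | cons c r ih =>
    by_cases hc : c = '/' <;> simp [pvAux, hc, ih]

theorem pv_pyGet?_neg_one {α : Type} (xs : List α) : PySem.List.pyGet? xs (-1) = xs.getLast? := by
  cases xs with
  | nil => rfl
  | cons x t =>
    simp only [PySem.List.pyGet?, PySem.List.pyIdx?]
    norm_num
    rw [List.getLast?_eq_getElem?]
    simp

-- what A computes from the list of parts
def pvF (parts : List (List Char)) : List Char :=
  parts.dropLast.foldl (fun acc text => acc ++ text ++ ['/']) [] ++ "colatted_".toList ++ (parts.getLast?).getD []

theorem pvF_eq_flat (parts : List (List Char)) :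
    pvF parts = parts.dropLast.flatMap (fun t => t ++ ['/']) ++ "colatted_".toList ++ (parts.getLast?).getD [] := by
  unfold pvF
  have := PySem.List.foldl_append_eq_flatMap (fun t : List Char => t ++ ['/']) parts.dropLast []
  simp only [List.nil_append] at this
  rw [← this]
  simp [List.append_assoc]

theorem pvF_cons (x : List Char) (parts : List (List Char)) (h : parts ≠ []) :
    pvF (x :: parts) = x ++ '/' :: pvF parts := by
  obtain ⟨p, ps, rfl⟩ := List.exists_cons_of_ne_nil h
  rw [pvF_eq_flat, pvF_eq_flat]
  simp [List.append_assoc]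

theorem pv_G (s : List Char) : ∀ cur : List Char,
    pvF (pvAux s cur) =
      if '/' ∈ s then cur.reverse ++ pvAnat s else "colatted_".toList ++ cur.reverse ++ s := by
  induction s with
  | nil =>
    intro cur
    simp [pvAux, pvF]
  | cons c r ih =>
    intro cur
    by_cases hc : c = '/'
    · simp only [pvAux, if_pos hc]
      rw [pvF_cons _ _ (pvAux_ne_nil r [])]
      rw [ih []]
      subst hc
      by_cases hr : '/' ∈ r
      · simp [hr, pvAnat]
      · simp [hr, pvAnat, pvAnat_no_slash r hr]
    · simp only [pvAux, if_neg hc]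
      rw [ih (c :: cur)]
      have hc' : ¬ ('/' = c) := fun h => hc h.symm
      have hm : ('/' ∈ c :: r) = ('/' ∈ r) := by
        simp [List.mem_cons, hc']
      by_cases hr : '/' ∈ r
      · simp [hr, hm, pvAnat, hc]
      · simp [hr, hm, List.append_assoc]

theorem pv_A_eq (olddir : String) :
    (getnewdir olddir).toList = pvAnat olddir.toList := by
  simp only [getnewdir, String.toList_ofList]
  rw [pv_splitOn_eq_aux, pv_pyGet?_neg_one]
  set s := olddir.toList with hs
  have : (pvAux s []).dropLast.foldl (fun acc text => acc ++ text ++ ['/']) [] ++ "colatted_".toList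
      ++ ((pvAux s []).getLast?).getD [] = pvF (pvAux s []) := rfl
  show (pvAux s []).dropLast.foldl (fun acc text => acc ++ text ++ ['/']) [] ++ "colatted_".toList
      ++ ((pvAux s []).getLast?).getD [] = pvAnat s
  rw [this, pv_G s []]
  by_cases hr : '/' ∈ s
  · simp [hr]
  · simp [hr, pvAnat_no_slash s hr]

-- ---- B side: characterising rfind on the single-character needle '/'
theorem pv_rfind_go_ge (s sub : List Char) : ∀ j : ℕ, -1 ≤ PySem.Chars.rfind.go s sub j := by
  intro j
  induction j with
  | zero =>
    rw [PySem.Chars.rfind.go]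
    split
    · omega
    · omega
  | succ j ih =>
    rw [PySem.Chars.rfind.go]
    split
    · omega
    · exact ih

theorem pv_rfind_go_cons (c : Char) (r : List Char) : ∀ j : ℕ,
    PySem.Chars.rfind.go (c :: r) ['/'] (j + 1) =
      (if PySem.Chars.rfind.go r ['/'] j = -1 then (if c = '/' then 0 else -1)
       else PySem.Chars.rfind.go r ['/'] j + 1) := by
  intro j
  induction j with
  | zero =>
    rw [PySem.Chars.rfind.go, PySem.Chars.rfind.go, PySem.Chars.rfind.go]
    simp only [List.drop_succ_cons, List.drop_zero, zero_add]
    by_cases hp : ['/'].isPrefixOf r = true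
    · simp [hp]
    · simp only [Bool.not_eq_true] at hp
      by_cases hc : c = '/'
      · simp [hp, List.isPrefixOf, hc]
      · have hc' : ¬ ('/' = c) := fun h => hc h.symm
        have : ['/'].isPrefixOf (c :: r) = false := by simp [List.isPrefixOf, hc']
        simp [hp, this, hc]
  | succ j ih =>
    rw [PySem.Chars.rfind.go]
    conv_rhs => rw [PySem.Chars.rfind.go]
    simp only [List.drop_succ_cons]
    by_cases hp : ['/'].isPrefixOf (List.drop (j + 1) r) = true
    · have hne' : ¬ ((((j + 1 : ℕ)) : ℤ) = -1) := by push_cast; omega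
      simp only [hp, if_true, hne', if_false]
      push_cast
      ring
    · simp only [Bool.not_eq_true] at hp
      simp only [hp, Bool.false_eq_true, if_false]
      exact ih

theorem pv_rfind_nil : PySem.Chars.rfind [] ['/'] = -1 := by
  show PySem.Chars.rfind.go [] ['/'] 0 = -1
  rw [PySem.Chars.rfind.go]
  simp [List.isPrefixOf]

theorem pv_rfind_cons (c : Char) (r : List Char) :
    PySem.Chars.rfind (c :: r) ['/'] =
      (if PySem.Chars.rfind r ['/'] = -1 then (if c = '/' then 0 else -1)
       else PySem.Chars.rfind r ['/'] + 1) := by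
  show PySem.Chars.rfind.go (c :: r) ['/'] (r.length + 1) = _
  exact pv_rfind_go_cons c r r.length

theorem pv_rfind_ge (s : List Char) : -1 ≤ PySem.Chars.rfind s ['/'] :=
  pv_rfind_go_ge s ['/'] s.length

theorem pv_rfind_eq_neg_one_iff (s : List Char) :
    PySem.Chars.rfind s ['/'] = -1 ↔ '/' ∉ s := by
  induction s with
  | nil => simp [pv_rfind_nil]
  | cons c r ih =>
    rw [pv_rfind_cons]
    by_cases hr : PySem.Chars.rfind r ['/'] = -1
    · have hnr : '/' ∉ r := ih.mp hr
      by_cases hc : c = '/'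
      · simp [hr, hc, hnr]
      · have hc' : ¬ ('/' = c) := fun h => hc h.symm
        simp [hr, hc, hnr, hc']
    · have hge := pv_rfind_ge r
      have hmem : '/' ∈ r := by
        by_contra hn
        exact hr (ih.mpr hn)
      simp only [hr, if_false]
      constructor
      · intro h; omega
      · intro h
        exact absurd (List.mem_cons_of_mem c hmem) h

theorem pv_B_eq (s : List Char) :
    List.take (PySem.Chars.rfind s ['/'] + 1).toNat s ++ "colatted_".toList
      ++ List.drop (PySem.Chars.rfind s ['/'] + 1).toNat s = pvAnat s := by
  induction s with
  | nil => simp [pv_rfind_nil, pvAnat]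
  | cons c r ih =>
    rw [pv_rfind_cons]
    by_cases hr : PySem.Chars.rfind r ['/'] = -1
    · have hnr : '/' ∉ r := (pv_rfind_eq_neg_one_iff r).mp hr
      by_cases hc : c = '/'
      · simp only [hr, if_true, hc]
        norm_num
        simp [pvAnat, pvAnat_no_slash r hnr]
      · simp only [hr, if_true, if_neg hc]
        norm_num
        simp [pvAnat, hc, hnr]
    · have hge := pv_rfind_ge r
      have hmem : '/' ∈ r := by
        by_contra hn
        exact hr ((pv_rfind_eq_neg_one_iff r).mpr hn)
      simp only [hr, if_false]
      have h0 : 0 ≤ PySem.Chars.rfind r ['/'] := by omega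
      have hk : (PySem.Chars.rfind r ['/'] + 1 + 1).toNat = (PySem.Chars.rfind r ['/'] + 1).toNat + 1 := by omega
      rw [hk]
      simp only [List.take_succ_cons, List.drop_succ_cons]
      have hA : pvAnat (c :: r) = c :: pvAnat r := by
        simp [pvAnat, hmem]
      rw [hA, ← ih]
      simp

theorem pv_B_val (olddir : String) : (getnewdir_alt olddir).toList = pvAnat olddir.toList := by
  simp only [getnewdir_alt, String.toList_ofList]
  set s := olddir.toList with hs
  have hge := pv_rfind_ge s
  have h0 : 0 ≤ PySem.Chars.rfind s ['/'] + 1 := by omega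
  rw [PySem.Chars.slice_eq_listSlice, PySem.Chars.slice_eq_listSlice,
      PySem.List.slice_to _ h0, PySem.List.slice_from _ h0]
  exact pv_B_eq s

-- ===== VERDICT (by name: the statement is the Claim_ definition above) =====
theorem getnewdir_spec : Claim_equal_getnewdir := by
  intro olddir _
  show getnewdir olddir = getnewdir_alt olddir
  have h : (getnewdir olddir).toList = (getnewdir_alt olddir).toList := by
    rw [pv_A_eq olddir, pv_B_val olddir]
  exact String.toList_inj.mp h
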